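-- pv_equiv track=rewrite | github.com/monkeydrummer/SurveyData2025 | app.py | categorize_questions
-- ===== SOURCE A (Python) =====
-- def categorize_questions(likert_cols):
--     """Categorize questions by theme based on keywords"""
--     categories = {
--         'Customer Focused': [],
--         'Innovation': [],
--         'Excellence': [],
--         'Accountability': [],
--         'Supportive': [],
--         'Culture & Values Awareness': [],
--         'Growth & Change': [],
--         'Other': []
--     }
--
--     for col in likert_cols:
--         col_lower = col.lower()
--         if 'customer' in col_lower:
--             categories['Customer Focused'].append(col)
--         elif 'innov' in col_lower or 'new' in col_lower or 'bold' in col_lower: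
--             categories['Innovation'].append(col)
--         elif 'excellence' in col_lower or 'high standard' in col_lower or 'deliver great' in col_lower or 'pride' in col_lower or 'best' in col_lower:
--             categories['Excellence'].append(col)
--         elif 'accountab' in col_lower or 'own' in col_lower or 'decision' in col_lower and 'own' in col_lower:
--             categories['Accountability'].append(col)
--         elif 'support' in col_lower or 'help' in col_lower or 'encourag' in col_lower:
--             categories['Supportive'].append(col)
--         elif 'value' in col_lower or 'culture' in col_lower or 'mission' in col_lower or 'recommend' in col_lower:
--             categories['Culture & Values Awareness'].append(col)
--         elif 'growth' in col_lower or 'change' in col_lower or 'acquisition' in col_lower or 'anxious' in col_lower or 'expand' in col_lower: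
--             categories['Growth & Change'].append(col)
--         else:
--             categories['Other'].append(col)
--
--     # Remove empty categories
--     return {k: v for k, v in categories.items() if v}
-- ===== SOURCE B (Python) =====
-- CATEGORIES = [
--     ('Customer Focused', ['customer']),
--     ('Innovation', ['innov', 'new', 'bold']),
--     ('Excellence', ['excellence', 'high standard', 'deliver great', 'pride', 'best']),
--     ('Accountability', ['accountab', 'own']),
--     ('Supportive', ['support', 'help', 'encourag']),
--     ('Culture & Values Awareness', ['value', 'culture', 'mission', 'recommend']),
--     ('Growth & Change', ['growth', 'change', 'acquisition', 'anxious', 'expand']),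
-- ]
--
--
-- def _label(col):
--     cl = col.lower()
--     return next((name for name, kws in CATEGORIES if any(k in cl for k in kws)), 'Other')
--
--
-- def categorize_questions(likert_cols):
--     """Categorize questions by theme based on keywords"""
--     order = [name for name, _ in CATEGORIES] + ['Other']
--     labels = [_label(c) for c in likert_cols]
--     groups = {name: [c for c, l in zip(likert_cols, labels) if l == name] for name in order}
--     return {k: v for k, v in groups.items() if v}
-- ===== Notes on version B (the rewrite author's own statement) =====
-- stated objective: simpler
-- what changed: Replaces the 8-way if/elif chain mutating a pre-built dict with a data-driven (category, keywords) table and a classifier function, grouping columns by one per-category comprehension; the redundant 'decision' and 'own' term is dropped since it is subsumed by 'own'.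
import Mathlib
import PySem

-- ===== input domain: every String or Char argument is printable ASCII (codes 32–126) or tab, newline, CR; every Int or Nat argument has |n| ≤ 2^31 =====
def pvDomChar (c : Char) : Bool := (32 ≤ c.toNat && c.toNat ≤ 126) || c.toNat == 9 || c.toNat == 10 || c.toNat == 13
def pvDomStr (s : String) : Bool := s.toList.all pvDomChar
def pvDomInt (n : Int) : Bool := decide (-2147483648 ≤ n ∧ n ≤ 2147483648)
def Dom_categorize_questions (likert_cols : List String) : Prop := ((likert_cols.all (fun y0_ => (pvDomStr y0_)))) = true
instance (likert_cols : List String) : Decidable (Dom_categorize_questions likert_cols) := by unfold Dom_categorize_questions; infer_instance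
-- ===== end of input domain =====

-- B replaces A's if/elif chain mutating a pre-built dict by a (category, keywords) table with a
-- classifier, grouping the columns by one per-category filter; same cost, simpler decomposition.
-- ===== PORT A =====
def categorize_questions (likert_cols : List String) : List (String × List String) :=
  let categories : PySem.Dict String (List String) := PySem.Dict.ofList
    [("Customer Focused", []), ("Innovation", []), ("Excellence", []), ("Accountability", []),
     ("Supportive", []), ("Culture & Values Awareness", []), ("Growth & Change", []), ("Other", [])]
  let categories := likert_cols.foldl (fun d col =>
    let cl := PySem.Str.lower col
    if PySem.Str.isIn "customer" cl then
      d.modify "Customer Focused" [] (· ++ [col])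
    else if PySem.Str.isIn "innov" cl || PySem.Str.isIn "new" cl || PySem.Str.isIn "bold" cl then
      d.modify "Innovation" [] (· ++ [col])
    else if PySem.Str.isIn "excellence" cl || PySem.Str.isIn "high standard" cl || PySem.Str.isIn "deliver great" cl || PySem.Str.isIn "pride" cl || PySem.Str.isIn "best" cl then
      d.modify "Excellence" [] (· ++ [col])
    else if PySem.Str.isIn "accountab" cl || PySem.Str.isIn "own" cl || (PySem.Str.isIn "decision" cl && PySem.Str.isIn "own" cl) then
      d.modify "Accountability" [] (· ++ [col])
    else if PySem.Str.isIn "support" cl || PySem.Str.isIn "help" cl || PySem.Str.isIn "encourag" cl then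
      d.modify "Supportive" [] (· ++ [col])
    else if PySem.Str.isIn "value" cl || PySem.Str.isIn "culture" cl || PySem.Str.isIn "mission" cl || PySem.Str.isIn "recommend" cl then
      d.modify "Culture & Values Awareness" [] (· ++ [col])
    else if PySem.Str.isIn "growth" cl || PySem.Str.isIn "change" cl || PySem.Str.isIn "acquisition" cl || PySem.Str.isIn "anxious" cl || PySem.Str.isIn "expand" cl then
      d.modify "Growth & Change" [] (· ++ [col])
    else
      d.modify "Other" [] (· ++ [col])) categories
  categories.items.filter (fun kv => !kv.2.isEmpty)

-- ===== PORT B =====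
def pvCATEGORIES : List (String × List String) :=
  [("Customer Focused", ["customer"]),
   ("Innovation", ["innov", "new", "bold"]),
   ("Excellence", ["excellence", "high standard", "deliver great", "pride", "best"]),
   ("Accountability", ["accountab", "own"]),
   ("Supportive", ["support", "help", "encourag"]),
   ("Culture & Values Awareness", ["value", "culture", "mission", "recommend"]),
   ("Growth & Change", ["growth", "change", "acquisition", "anxious", "expand"])]

def pvLabel (col : String) : String :=
  let cl := PySem.Str.lower col
  match pvCATEGORIES.find? (fun e => e.2.any (fun k => PySem.Str.isIn k cl)) with
  | some e => e.1
  | none => "Other"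

def categorize_questions_alt (likert_cols : List String) : List (String × List String) :=
  let order := pvCATEGORIES.map (·.1) ++ ["Other"]
  let labels := likert_cols.map pvLabel
  let groups := order.map (fun name =>
    (name, ((likert_cols.zip labels).filter (fun p => p.2 == name)).map (·.1)))
  groups.filter (fun kv => !kv.2.isEmpty)

-- ===== PRECONDITION & SPEC =====
def Spec_categorize_questions (likert_cols : List String) (out : List (String × List String)) : Prop := out = categorize_questions_alt likert_cols
instance (likert_cols : List String) (out : List (String × List String)) : Decidable (Spec_categorize_questions likert_cols out) := by unfold Spec_categorize_questions; infer_instance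

-- ===== CLAIM (what is proved, stated in full; the proofs are below) =====
def Claim_equal_categorize_questions : Prop := ∀ (likert_cols : List String), Dom_categorize_questions likert_cols → Spec_categorize_questions likert_cols (categorize_questions likert_cols)

-- ===== LEMMAS AND PROOFS =====

-- the key A's if/elif chain selects for a column (proof helper)
def pvKeyA (col : String) : String :=
  let cl := PySem.Str.lower col
  if PySem.Str.isIn "customer" cl then "Customer Focused"
  else if PySem.Str.isIn "innov" cl || PySem.Str.isIn "new" cl || PySem.Str.isIn "bold" cl then "Innovation"
  else if PySem.Str.isIn "excellence" cl || PySem.Str.isIn "high standard" cl || PySem.Str.isIn "deliver great" cl || PySem.Str.isIn "pride" cl || PySem.Str.isIn "best" cl then "Excellence"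
  else if PySem.Str.isIn "accountab" cl || PySem.Str.isIn "own" cl || (PySem.Str.isIn "decision" cl && PySem.Str.isIn "own" cl) then "Accountability"
  else if PySem.Str.isIn "support" cl || PySem.Str.isIn "help" cl || PySem.Str.isIn "encourag" cl then "Supportive"
  else if PySem.Str.isIn "value" cl || PySem.Str.isIn "culture" cl || PySem.Str.isIn "mission" cl || PySem.Str.isIn "recommend" cl then "Culture & Values Awareness"
  else if PySem.Str.isIn "growth" cl || PySem.Str.isIn "change" cl || PySem.Str.isIn "acquisition" cl || PySem.Str.isIn "anxious" cl || PySem.Str.isIn "expand" cl then "Growth & Change"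
  else "Other"

set_option maxHeartbeats 1000000 in
lemma pvLabel_eq_keyA (col : String) : pvLabel col = pvKeyA col := by
  by_cases h0 : PySem.Str.isIn "customer" (PySem.Str.lower col) = true
  · simp_all [pvLabel, pvKeyA, pvCATEGORIES, List.find?]
  simp only [Bool.not_eq_true] at h0
  by_cases h1 : PySem.Str.isIn "innov" (PySem.Str.lower col) = true
  · simp_all [pvLabel, pvKeyA, pvCATEGORIES, List.find?]
  simp only [Bool.not_eq_true] at h1
  by_cases h2 : PySem.Str.isIn "new" (PySem.Str.lower col) = true
  · simp_all [pvLabel, pvKeyA, pvCATEGORIES, List.find?]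
  simp only [Bool.not_eq_true] at h2
  by_cases h3 : PySem.Str.isIn "bold" (PySem.Str.lower col) = true
  · simp_all [pvLabel, pvKeyA, pvCATEGORIES, List.find?]
  simp only [Bool.not_eq_true] at h3
  by_cases h4 : PySem.Str.isIn "excellence" (PySem.Str.lower col) = true
  · simp_all [pvLabel, pvKeyA, pvCATEGORIES, List.find?]
  simp only [Bool.not_eq_true] at h4
  by_cases h5 : PySem.Str.isIn "high standard" (PySem.Str.lower col) = true
  · simp_all [pvLabel, pvKeyA, pvCATEGORIES, List.find?]
  simp only [Bool.not_eq_true] at h5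
  by_cases h6 : PySem.Str.isIn "deliver great" (PySem.Str.lower col) = true
  · simp_all [pvLabel, pvKeyA, pvCATEGORIES, List.find?]
  simp only [Bool.not_eq_true] at h6
  by_cases h7 : PySem.Str.isIn "pride" (PySem.Str.lower col) = true
  · simp_all [pvLabel, pvKeyA, pvCATEGORIES, List.find?]
  simp only [Bool.not_eq_true] at h7
  by_cases h8 : PySem.Str.isIn "best" (PySem.Str.lower col) = true
  · simp_all [pvLabel, pvKeyA, pvCATEGORIES, List.find?]
  simp only [Bool.not_eq_true] at h8
  by_cases h9 : PySem.Str.isIn "accountab" (PySem.Str.lower col) = true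
  · simp_all [pvLabel, pvKeyA, pvCATEGORIES, List.find?]
  simp only [Bool.not_eq_true] at h9
  by_cases h10 : PySem.Str.isIn "own" (PySem.Str.lower col) = true
  · simp_all [pvLabel, pvKeyA, pvCATEGORIES, List.find?]
  simp only [Bool.not_eq_true] at h10
  by_cases h11 : PySem.Str.isIn "support" (PySem.Str.lower col) = true
  · simp_all [pvLabel, pvKeyA, pvCATEGORIES, List.find?]
  simp only [Bool.not_eq_true] at h11
  by_cases h12 : PySem.Str.isIn "help" (PySem.Str.lower col) = true
  · simp_all [pvLabel, pvKeyA, pvCATEGORIES, List.find?]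
  simp only [Bool.not_eq_true] at h12
  by_cases h13 : PySem.Str.isIn "encourag" (PySem.Str.lower col) = true
  · simp_all [pvLabel, pvKeyA, pvCATEGORIES, List.find?]
  simp only [Bool.not_eq_true] at h13
  by_cases h14 : PySem.Str.isIn "value" (PySem.Str.lower col) = true
  · simp_all [pvLabel, pvKeyA, pvCATEGORIES, List.find?]
  simp only [Bool.not_eq_true] at h14
  by_cases h15 : PySem.Str.isIn "culture" (PySem.Str.lower col) = true
  · simp_all [pvLabel, pvKeyA, pvCATEGORIES, List.find?]
  simp only [Bool.not_eq_true] at h15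
  by_cases h16 : PySem.Str.isIn "mission" (PySem.Str.lower col) = true
  · simp_all [pvLabel, pvKeyA, pvCATEGORIES, List.find?]
  simp only [Bool.not_eq_true] at h16
  by_cases h17 : PySem.Str.isIn "recommend" (PySem.Str.lower col) = true
  · simp_all [pvLabel, pvKeyA, pvCATEGORIES, List.find?]
  simp only [Bool.not_eq_true] at h17
  by_cases h18 : PySem.Str.isIn "growth" (PySem.Str.lower col) = true
  · simp_all [pvLabel, pvKeyA, pvCATEGORIES, List.find?]
  simp only [Bool.not_eq_true] at h18
  by_cases h19 : PySem.Str.isIn "change" (PySem.Str.lower col) = true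
  · simp_all [pvLabel, pvKeyA, pvCATEGORIES, List.find?]
  simp only [Bool.not_eq_true] at h19
  by_cases h20 : PySem.Str.isIn "acquisition" (PySem.Str.lower col) = true
  · simp_all [pvLabel, pvKeyA, pvCATEGORIES, List.find?]
  simp only [Bool.not_eq_true] at h20
  by_cases h21 : PySem.Str.isIn "anxious" (PySem.Str.lower col) = true
  · simp_all [pvLabel, pvKeyA, pvCATEGORIES, List.find?]
  simp only [Bool.not_eq_true] at h21
  by_cases h22 : PySem.Str.isIn "expand" (PySem.Str.lower col) = true
  · simp_all [pvLabel, pvKeyA, pvCATEGORIES, List.find?]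
  simp only [Bool.not_eq_true] at h22
  simp_all [pvLabel, pvKeyA, pvCATEGORIES]

def pvStep (d : PySem.Dict String (List String)) (col : String) : PySem.Dict String (List String) :=
  d.modify (pvKeyA col) [] (· ++ [col])

lemma pvBody_eq_step (d : PySem.Dict String (List String)) (col : String) :
    (let cl := PySem.Str.lower col
     if PySem.Str.isIn "customer" cl then
       d.modify "Customer Focused" [] (· ++ [col])
     else if PySem.Str.isIn "innov" cl || PySem.Str.isIn "new" cl || PySem.Str.isIn "bold" cl then
       d.modify "Innovation" [] (· ++ [col])
     else if PySem.Str.isIn "excellence" cl || PySem.Str.isIn "high standard" cl || PySem.Str.isIn "deliver great" cl || PySem.Str.isIn "pride" cl || PySem.Str.isIn "best" cl then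
       d.modify "Excellence" [] (· ++ [col])
     else if PySem.Str.isIn "accountab" cl || PySem.Str.isIn "own" cl || (PySem.Str.isIn "decision" cl && PySem.Str.isIn "own" cl) then
       d.modify "Accountability" [] (· ++ [col])
     else if PySem.Str.isIn "support" cl || PySem.Str.isIn "help" cl || PySem.Str.isIn "encourag" cl then
       d.modify "Supportive" [] (· ++ [col])
     else if PySem.Str.isIn "value" cl || PySem.Str.isIn "culture" cl || PySem.Str.isIn "mission" cl || PySem.Str.isIn "recommend" cl then
       d.modify "Culture & Values Awareness" [] (· ++ [col])
     else if PySem.Str.isIn "growth" cl || PySem.Str.isIn "change" cl || PySem.Str.isIn "acquisition" cl || PySem.Str.isIn "anxious" cl || PySem.Str.isIn "expand" cl then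
       d.modify "Growth & Change" [] (· ++ [col])
     else
       d.modify "Other" [] (· ++ [col])) = pvStep d col := by
  unfold pvStep pvKeyA
  dsimp only
  split_ifs <;> rfl

lemma pvZip_filter (f : String → String) (name : String) (cols : List String) :
    (((cols.zip (cols.map f)).filter (fun p => p.2 == name)).map (·.1)) =
      cols.filter (fun c => f c == name) := by
  induction cols with
  | nil => rfl
  | cons c cs ih =>
    simp only [List.map_cons, List.zip_cons_cons, List.filter_cons]
    by_cases h : (f c == name) = true <;> simp [h, ih]

lemma pvFoldl_getD (cols : List String) (d : PySem.Dict String (List String)) (k : String) :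
    (cols.foldl pvStep d).getD k [] = d.getD k [] ++ cols.filter (fun c => pvKeyA c == k) := by
  induction cols generalizing d with
  | nil => simp
  | cons c cs ih =>
    simp only [List.foldl_cons, List.filter_cons, ih]
    unfold pvStep
    rw [PySem.Dict.getD_modify]
    by_cases h : k = pvKeyA c
    · subst h
      simp
    · have hb : (pvKeyA c == k) = false := by
        simp only [beq_eq_false_iff_ne]
        exact fun e => h e.symm
      simp [h, hb]

lemma pvFoldl_keys (cols : List String) (d : PySem.Dict String (List String))
    (hk : ∀ s, d.contains (pvKeyA s) = true) :
    (cols.foldl pvStep d).keys = d.keys := by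
  induction cols generalizing d with
  | nil => rfl
  | cons c cs ih =>
    have hkeys : (pvStep d c).keys = d.keys := by
      unfold pvStep
      rw [PySem.Dict.keys_modify, PySem.Dict.keys_insert_of_contains]
      exact hk c
    simp only [List.foldl_cons]
    rw [ih _ ?_, hkeys]
    intro s
    rw [PySem.Dict.contains_iff_mem_keys, hkeys, ← PySem.Dict.contains_iff_mem_keys]
    exact hk s

-- ===== VERDICT (by name: the statement is the Claim_ definition above) =====
set_option maxHeartbeats 1000000 in
theorem categorize_questions_spec : Claim_equal_categorize_questions := by
  intro cols _
  unfold Spec_categorize_questions categorize_questions categorize_questions_alt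
  dsimp only
  have hbody : (fun (d : PySem.Dict String (List String)) col =>
      let cl := PySem.Str.lower col
      if PySem.Str.isIn "customer" cl then
        d.modify "Customer Focused" [] (· ++ [col])
      else if PySem.Str.isIn "innov" cl || PySem.Str.isIn "new" cl || PySem.Str.isIn "bold" cl then
        d.modify "Innovation" [] (· ++ [col])
      else if PySem.Str.isIn "excellence" cl || PySem.Str.isIn "high standard" cl || PySem.Str.isIn "deliver great" cl || PySem.Str.isIn "pride" cl || PySem.Str.isIn "best" cl then
        d.modify "Excellence" [] (· ++ [col])
      else if PySem.Str.isIn "accountab" cl || PySem.Str.isIn "own" cl || (PySem.Str.isIn "decision" cl && PySem.Str.isIn "own" cl) then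
        d.modify "Accountability" [] (· ++ [col])
      else if PySem.Str.isIn "support" cl || PySem.Str.isIn "help" cl || PySem.Str.isIn "encourag" cl then
        d.modify "Supportive" [] (· ++ [col])
      else if PySem.Str.isIn "value" cl || PySem.Str.isIn "culture" cl || PySem.Str.isIn "mission" cl || PySem.Str.isIn "recommend" cl then
        d.modify "Culture & Values Awareness" [] (· ++ [col])
      else if PySem.Str.isIn "growth" cl || PySem.Str.isIn "change" cl || PySem.Str.isIn "acquisition" cl || PySem.Str.isIn "anxious" cl || PySem.Str.isIn "expand" cl then
        d.modify "Growth & Change" [] (· ++ [col])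
      else
        d.modify "Other" [] (· ++ [col])) = pvStep := by
    funext d col
    exact pvBody_eq_step d col
  rw [hbody]
  set d0 : PySem.Dict String (List String) := PySem.Dict.ofList
    [("Customer Focused", []), ("Innovation", []), ("Excellence", []), ("Accountability", []),
     ("Supportive", []), ("Culture & Values Awareness", []), ("Growth & Change", []), ("Other", [])] with hd0
  have hcont : ∀ s, d0.contains (pvKeyA s) = true := by
    intro s
    unfold pvKeyA
    dsimp only
    split_ifs <;> decide
  have hkeys : (cols.foldl pvStep d0).keys = d0.keys := pvFoldl_keys cols d0 hcont
  have hnd : (cols.foldl pvStep d0).keys.Nodup := by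
    rw [hkeys]; decide
  rw [PySem.Dict.items_eq_map_keys _ hnd ([] : List String), hkeys]
  have hgetD : ∀ k, (cols.foldl pvStep d0).getD k [] = d0.getD k [] ++ cols.filter (fun c => pvKeyA c == k) :=
    fun k => pvFoldl_getD cols d0 k
  simp only [hgetD, pvZip_filter, pvLabel_eq_keyA]
  rw [hd0]
  simp [pvCATEGORIES, PySem.Dict.ofList, PySem.Dict.getD, PySem.Dict.get?,
    PySem.Dict.insert, PySem.Dict.contains, PySem.Dict.empty, PySem.Dict.update, PySem.Dict.keys]
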